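-- pv_equiv track=rewrite | github.com/EmrullahAydogan/arc-agi-rl-playground | src/perception/object_detector.py | _is_diagonal
-- ===== SOURCE A (Python) =====
-- from typing import List, Dict, Tuple, Optional
--
-- def _is_diagonal(pixels: List[Tuple[int, int]]) -> bool:
--     """Check if pixels form a diagonal line"""
--     if len(pixels) < 3:
--         return False
--
--     # Check if all pixels are on a diagonal
--     pixels_sorted = sorted(pixels)
--     first = pixels_sorted[0]
--
--     # Check main diagonal (row+col constant) or anti-diagonal (row-col constant)
--     main_diag = all((r - first[0]) == (c - first[1]) for r, c in pixels_sorted)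
--     anti_diag = all((r - first[0]) == -(c - first[1]) for r, c in pixels_sorted)
--
--     return main_diag or anti_diag
-- ===== SOURCE B (Python) =====
-- def _is_diagonal(pixels):
--     """Check if pixels form a diagonal line"""
--     if len(pixels) < 3:
--         return False
--     deltas = [(r2 - r1, c2 - c1) for (r1, c1), (r2, c2) in zip(pixels, pixels[1:])]
--     return all(dr == dc for dr, dc in deltas) or all(dr == -dc for dr, dc in deltas)
-- ===== Notes on version B (the rewrite author's own statement) =====
-- stated objective: faster
-- what changed: Replaces sort-then-compare-against-a-reference-pixel with an O(n) pass over the list of consecutive difference vectors (zip with the tail), checking every delta satisfies dr==dc or every delta satisfies dr==-dc; constancy of r-c (resp. r+c) is equivalent to all adjacent differences agreeing.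
import Mathlib
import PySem

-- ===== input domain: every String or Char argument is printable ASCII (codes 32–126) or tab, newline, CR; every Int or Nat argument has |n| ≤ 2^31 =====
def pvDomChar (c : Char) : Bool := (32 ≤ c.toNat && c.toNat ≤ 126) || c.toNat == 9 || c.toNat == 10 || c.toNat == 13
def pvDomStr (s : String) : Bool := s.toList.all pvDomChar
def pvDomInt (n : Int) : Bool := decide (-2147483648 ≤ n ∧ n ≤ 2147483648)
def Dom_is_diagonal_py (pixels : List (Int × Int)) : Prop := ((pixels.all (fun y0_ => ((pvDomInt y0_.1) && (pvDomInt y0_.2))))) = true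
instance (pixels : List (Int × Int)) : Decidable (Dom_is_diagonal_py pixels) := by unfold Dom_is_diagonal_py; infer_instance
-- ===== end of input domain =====

-- B drops the sort and the reference pixel: one O(n) pass over the consecutive difference
-- vectors (zip with the tail), checking all deltas have dr = dc or all have dr = -dc
-- (O(n) vs A's sort; wall-clock difference not measurable at tested sizes).

-- ===== PORT A =====
def is_diagonal_py (pixels : List (Int × Int)) : Bool :=
  if pixels.length < 3 then false
  else
    let pixels_sorted := PySem.List.sorted2 pixels (fun p => p.1) (fun p => p.2) false
    match PySem.List.pyGet? pixels_sorted 0 with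
    | none => false  -- unreachable: pixels_sorted has ≥ 3 elements (IndexError never happens)
    | some first =>
      let main_diag := pixels_sorted.all (fun p => decide (p.1 - first.1 = p.2 - first.2))
      let anti_diag := pixels_sorted.all (fun p => decide (p.1 - first.1 = -(p.2 - first.2)))
      main_diag || anti_diag

-- ===== PORT B =====
def is_diagonal_py_alt (pixels : List (Int × Int)) : Bool :=
  if pixels.length < 3 then false
  else
    -- zip(pixels, pixels[1:]) → pixels.zip pixels.tail (PySem.List.slice_from_one; zip truncates in both)
    let deltas := (pixels.zip pixels.tail).map (fun q => (q.2.1 - q.1.1, q.2.2 - q.1.2))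
    deltas.all (fun d => decide (d.1 = d.2)) || deltas.all (fun d => decide (d.1 = -d.2))

-- ===== PRECONDITION & SPEC =====
def Spec_is_diagonal_py (pixels : List (Int × Int)) (out : Bool) : Prop := out = is_diagonal_py_alt pixels
instance (pixels : List (Int × Int)) (out : Bool) : Decidable (Spec_is_diagonal_py pixels out) := by unfold Spec_is_diagonal_py; infer_instance

-- ===== CLAIM (what is proved, stated in full; the proofs are below) =====
def Claim_equal_is_diagonal_py : Prop := ∀ (pixels : List (Int × Int)), Dom_is_diagonal_py pixels → Spec_is_diagonal_py pixels (is_diagonal_py pixels)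

-- ===== LEMMAS AND PROOFS =====

-- 'all elements have k-value equal to member x' is independent of which member x is used,
-- and of permuting the list.
lemma all_key_eq_ref {α : Type} (xs ys : List α) (k : α → Int) (x y : α)
    (hx : x ∈ xs) (hy : y ∈ ys) (hmem : ∀ z, z ∈ xs ↔ z ∈ ys) :
    xs.all (fun p => decide (k p = k x)) = ys.all (fun p => decide (k p = k y)) := by
  have hiff : (∀ p ∈ xs, k p = k x) ↔ (∀ p ∈ ys, k p = k y) := by
    constructor
    · intro h p hp
      rw [h p ((hmem p).mpr hp), ← h y ((hmem y).mpr hy)]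
    · intro h p hp
      rw [h p ((hmem p).mp hp), ← h x ((hmem x).mp hx)]
  apply Bool.coe_iff_coe.mp
  simpa [List.all_eq_true] using hiff

-- adjacent agreement of a key along the list ↔ the key equals the head's key everywhere
lemma chain_all {α : Type} (k : α → Int) :
    ∀ (xs : List α) (x : α),
      ((x :: xs).zip xs).all (fun q => decide (k q.2 = k q.1))
        = xs.all (fun p => decide (k p = k x)) := by
  intro xs
  induction xs with
  | nil => intro x; simp
  | cons y ys ih =>
    intro x
    simp only [List.zip_cons_cons, List.all_cons, ih y]
    by_cases h : k y = k x
    · simp [h]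
    · simp [h]

theorem is_diagonal_py_spec' : ∀ (pixels : List (Int × Int)),
    is_diagonal_py pixels = is_diagonal_py_alt pixels := by
  intro pixels
  unfold is_diagonal_py is_diagonal_py_alt
  by_cases hlen : pixels.length < 3
  · rw [if_pos hlen, if_pos hlen]
  · rw [if_neg hlen, if_neg hlen]
    match pixels, hlen with
    | (r0, c0) :: rest, hlen =>
    set ps := PySem.List.sorted2 ((r0, c0) :: rest) (fun p => p.1) (fun p => p.2) false with hps
    have hperm : ps.Perm ((r0, c0) :: rest) := PySem.List.sorted2_perm ..
    obtain ⟨f, t, hpe⟩ := List.exists_cons_of_ne_nil (l := ps)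
      (fun h => by rw [h] at hperm; simpa using hperm.length_eq)
    rw [hpe] at hperm ⊢
    have hmem : ∀ z, z ∈ f :: t ↔ z ∈ ((r0, c0) : Int × Int) :: rest := fun z => hperm.mem_iff
    have hget : PySem.List.pyGet? (f :: t) 0 = some f := by
      simp [PySem.List.pyGet?, PySem.List.pyIdx?]
    dsimp only
    rw [hget]
    dsimp only
    have hf : f ∈ f :: t := List.mem_cons_self ..
    have h0 : ((r0, c0) : Int × Int) ∈ (r0, c0) :: rest := List.mem_cons_self ..
    show (_ || _) = (_ || _)
    congr 1
    · -- main diagonal: k = r - c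
      have hB : ((((r0, c0) :: rest).zip rest).map (fun q => (q.2.1 - q.1.1, q.2.2 - q.1.2))).all
            (fun d => decide (d.1 = d.2))
          = rest.all (fun p => decide ((fun q : Int × Int => q.1 - q.2) p = (fun q : Int × Int => q.1 - q.2) ((r0, c0) : Int × Int))) := by
        rw [List.all_map]
        have : ((fun d : Int × Int => decide (d.1 = d.2)) ∘ (fun q : (Int × Int) × (Int × Int) => (q.2.1 - q.1.1, q.2.2 - q.1.2)))
            = (fun q : (Int × Int) × (Int × Int) => decide ((fun p : Int × Int => p.1 - p.2) q.2 = (fun p : Int × Int => p.1 - p.2) q.1)) :=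
          funext fun q => decide_eq_decide.mpr (by dsimp only [Function.comp]; omega)
        rw [this, chain_all (fun p : Int × Int => p.1 - p.2) rest ((r0, c0) : Int × Int)]
      have h1 : (fun p : Int × Int => decide (p.1 - f.1 = p.2 - f.2))
          = (fun p : Int × Int => decide ((fun q : Int × Int => q.1 - q.2) p = (fun q : Int × Int => q.1 - q.2) f)) :=
        funext fun p => decide_eq_decide.mpr (by dsimp only; omega)
      rw [show ((r0,c0)::rest).tail = rest from rfl, hB, h1,
        all_key_eq_ref (f :: t) ((r0, c0) :: rest) (fun q => q.1 - q.2) f (r0, c0) hf h0 hmem]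
      simp
    · -- anti diagonal: k = r + c
      have hB : ((((r0, c0) :: rest).zip rest).map (fun q => (q.2.1 - q.1.1, q.2.2 - q.1.2))).all
            (fun d => decide (d.1 = -d.2))
          = rest.all (fun p => decide ((fun q : Int × Int => q.1 + q.2) p = (fun q : Int × Int => q.1 + q.2) ((r0, c0) : Int × Int))) := by
        rw [List.all_map]
        have : ((fun d : Int × Int => decide (d.1 = -d.2)) ∘ (fun q : (Int × Int) × (Int × Int) => (q.2.1 - q.1.1, q.2.2 - q.1.2)))
            = (fun q : (Int × Int) × (Int × Int) => decide ((fun p : Int × Int => p.1 + p.2) q.2 = (fun p : Int × Int => p.1 + p.2) q.1)) :=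
          funext fun q => decide_eq_decide.mpr (by dsimp only [Function.comp]; omega)
        rw [this, chain_all (fun p : Int × Int => p.1 + p.2) rest ((r0, c0) : Int × Int)]
      have h2 : (fun p : Int × Int => decide (p.1 - f.1 = -(p.2 - f.2)))
          = (fun p : Int × Int => decide ((fun q : Int × Int => q.1 + q.2) p = (fun q : Int × Int => q.1 + q.2) f)) :=
        funext fun p => decide_eq_decide.mpr (by dsimp only; omega)
      rw [show ((r0,c0)::rest).tail = rest from rfl, hB, h2,
        all_key_eq_ref (f :: t) ((r0, c0) :: rest) (fun q => q.1 + q.2) f (r0, c0) hf h0 hmem]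
      simp

-- ===== VERDICT (by name: the statement is the Claim_ definition above) =====
theorem is_diagonal_py_spec : Claim_equal_is_diagonal_py := by
  intro pixels _
  unfold Spec_is_diagonal_py
  exact is_diagonal_py_spec' pixels
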